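-- pv_equiv track=rewrite | github.com/fetost/Diskmatte | projekt1.py | never_x_axis
-- ===== SOURCE A (Python) =====
-- def never_x_axis(path, start_y):
--     y = start_y
--     for move in path:
--         if move == 'U':
--             y += 1
--         else:
--             y -= 1
--         if y <= 0:  # LEss than or equal to 0, as we want to check if it touches the x-axis
--             return False
--     return True
-- ===== SOURCE B (Python) =====
-- def never_x_axis(path, start_y):
--     # Walk the path BACKWARDS, maintaining the minimum sum over all nonempty
--     # prefixes of the suffix seen so far:  minpref(d . w) = d + min(0, minpref(w)).
--     # The walk stays strictly above the x-axis iff start_y plus the minimum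
--     # nonempty-prefix sum is still positive (vacuously true for an empty path).
--     tail_min = None
--     for move in reversed(path):
--         d = 1 if move == 'U' else -1
--         tail_min = d if tail_min is None else d + min(0, tail_min)
--     return tail_min is None or start_y + tail_min > 0
-- ===== Notes on version B (the rewrite author's own statement) =====
-- stated objective: alternative
-- what changed: Instead of simulating the walk forward and testing the position after every step, B scans the path backwards maintaining the minimum nonempty-prefix move sum (minpref(d.w)=d+min(0,minpref(w))) and decides with one final comparison start_y+min>0.
import Mathlib
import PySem

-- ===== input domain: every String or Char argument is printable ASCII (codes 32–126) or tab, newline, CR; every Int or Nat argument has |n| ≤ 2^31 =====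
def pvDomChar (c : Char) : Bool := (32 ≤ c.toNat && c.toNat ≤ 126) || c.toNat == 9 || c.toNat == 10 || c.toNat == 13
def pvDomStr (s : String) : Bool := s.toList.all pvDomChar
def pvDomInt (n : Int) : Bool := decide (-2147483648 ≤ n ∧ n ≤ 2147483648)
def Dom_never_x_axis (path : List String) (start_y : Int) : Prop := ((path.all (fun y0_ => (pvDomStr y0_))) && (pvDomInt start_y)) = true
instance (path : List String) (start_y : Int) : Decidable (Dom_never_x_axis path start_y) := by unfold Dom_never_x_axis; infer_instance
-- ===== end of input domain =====

-- B scans the path backwards maintaining the minimum nonempty-prefix move sum and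
-- decides with one final comparison, instead of A's forward simulation with a test
-- after every step (alternative decomposition, same O(n) cost).

-- ===== PORT A =====
-- A's for-loop with early `return False`, as structural recursion over path with state y
def neverXAxisLoopA : List String → Int → Bool
  | [], _ => true
  | move :: rest, y =>
      let y' := if move == "U" then y + 1 else y - 1
      if y' ≤ 0 then false else neverXAxisLoopA rest y'

def never_x_axis (path : List String) (start_y : Int) : Bool :=
  neverXAxisLoopA path start_y

-- ===== PORT B =====
-- one step of B's backward loop: fold state tail_min (none = no move seen yet)
def tailMinStep (tm : Option Int) (move : String) : Option Int :=
  let d : Int := if move == "U" then 1 else -1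
  some (match tm with
        | none => d
        | some t => d + min 0 t)

def never_x_axis_alt (path : List String) (start_y : Int) : Bool :=
  let tail_min := path.reverse.foldl tailMinStep none
  match tail_min with
  | none => true
  | some m => decide (start_y + m > 0)

-- ===== PRECONDITION & SPEC =====
def Spec_never_x_axis (path : List String) (start_y : Int) (out : Bool) : Prop := out = never_x_axis_alt path start_y
instance (path : List String) (start_y : Int) (out : Bool) : Decidable (Spec_never_x_axis path start_y out) := by unfold Spec_never_x_axis; infer_instance

-- ===== CLAIM (what is proved, stated in full; the proofs are below) =====
def Claim_equal_never_x_axis : Prop := ∀ (path : List String) (start_y : Int), Dom_never_x_axis path start_y → Spec_never_x_axis path start_y (never_x_axis path start_y)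

-- ===== LEMMAS AND PROOFS =====

-- the backward foldl satisfies the head recurrence of the minimum-prefix-sum
theorem foldl_reverse_cons (m : String) (ms : List String) :
    (m :: ms).reverse.foldl tailMinStep none
      = tailMinStep (ms.reverse.foldl tailMinStep none) m := by
  simp [List.reverse_cons, List.foldl_append]

theorem loopA_eq_tailMin (path : List String) (y : Int) :
    neverXAxisLoopA path y =
      (match path.reverse.foldl tailMinStep none with
       | none => true
       | some m => decide (y + m > 0)) := by
  induction path generalizing y with
  | nil => simp [neverXAxisLoopA]
  | cons m ms ih =>
      rw [foldl_reverse_cons]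
      simp only [neverXAxisLoopA, tailMinStep]
      set d : Int := if m == "U" then 1 else -1 with hd
      have hy' : (if m == "U" then y + 1 else y - 1) = y + d := by
        by_cases h : m == "U" <;> simp [hd, h] <;> ring
      rw [hy', ih (y + d)]
      cases hms : ms.reverse.foldl tailMinStep none with
      | none =>
          simp only []
          by_cases h0 : y + d ≤ 0
          · rw [if_pos h0]; simp; omega
          · rw [if_neg h0]; simp; omega
      | some t =>
          simp only []
          by_cases h0 : y + d ≤ 0
          · rw [if_pos h0]
            have : ¬ (y + (d + min 0 t) > 0) := by
              have := min_le_left (0:Int) t; omega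
            simp [this]
          · rw [if_neg h0]
            rcases le_total (0:Int) t with ht | ht
            · simp [min_eq_left ht]; omega
            · simp [min_eq_right ht]; omega

-- ===== VERDICT (by name: the statement is the Claim_ definition above) =====
theorem never_x_axis_spec : Claim_equal_never_x_axis := by
  intro path start_y _
  unfold Spec_never_x_axis never_x_axis never_x_axis_alt
  rw [loopA_eq_tailMin]
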